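-- pv_equiv track=rewrite | github.com/JustAFloatingHead/KuhanPiirran | Geometry.py | boring_values
-- ===== SOURCE A (Python) =====
-- def boring_values(array2d):
--     result_array=[]
--     xsize=len(array2d)
--     ysize=len(array2d[0])
--     for x in range(0,xsize):
--         row=ysize*[None]
--         result_array.append(row)
--     for x in range(1,xsize-1):
--         ysize=len(result_array[x])
--         result_array[x][0]=None
--         result_array[x][ysize-1]=None
--         for y in range(1,ysize-1):
--             result_array[x][y]=array2d[x][y]
--             if (array2d[x][y]!=array2d[x-1][y]) or  (array2d[x][y]!=array2d[x+1][y]) or (array2d[x][y]!=array2d[x][y-1]):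
--                 result_array[x][y]=None
--             if array2d[x][y]!=array2d[x-1][y-1] or  (array2d[x][y]!=array2d[x+1][y-1]) or (array2d[x][y]!=array2d[x][y+1]):
--                 result_array[x][y]=None
--             if (array2d[x][y]!=array2d[x-1][y+1]) or  (array2d[x][y]!=array2d[x+1][y+1]):
--                 result_array[x][y]=None
--     return result_array
-- ===== SOURCE B (Python) =====
-- def boring_values(array2d):
--     xsize = len(array2d)
--     ysize = len(array2d[0])
--     # Stage 1 (separable filter): per-row horizontal-constancy mask.
--     # H[x][y] is True iff row x is defined and constant on [y-1, y+1].
--     H = [[0 < y < len(row) - 1 and row[y - 1] == row[y] == row[y + 1]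
--           for y in range(ysize)] for row in array2d]
--     # Stage 2: a cell is boring iff the three surrounding mask rows hold
--     # and the vertical column through the cell is constant.
--     return [[array2d[x][y]
--              if 0 < x < xsize - 1 and 0 < y < ysize - 1
--                 and H[x - 1][y] and H[x][y] and H[x + 1][y]
--                 and array2d[x - 1][y] == array2d[x][y] == array2d[x + 1][y]
--              else None
--              for y in range(ysize)]
--             for x in range(xsize)]
-- ===== Notes on version B (the rewrite author's own statement) =====
-- stated objective: alternative
-- what changed: Replaces A's single pass with three hardcoded 8-neighbour if-blocks by a separable two-stage filter: a first pass builds a per-row horizontal-constancy mask H, a second pass keeps a cell iff the three mask rows above/at/below it hold and its vertical column is constant.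
-- outside the precondition, e.g. on boring_values([[], [], []]): A raises IndexError, B returns [[], [], []]
import Mathlib
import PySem

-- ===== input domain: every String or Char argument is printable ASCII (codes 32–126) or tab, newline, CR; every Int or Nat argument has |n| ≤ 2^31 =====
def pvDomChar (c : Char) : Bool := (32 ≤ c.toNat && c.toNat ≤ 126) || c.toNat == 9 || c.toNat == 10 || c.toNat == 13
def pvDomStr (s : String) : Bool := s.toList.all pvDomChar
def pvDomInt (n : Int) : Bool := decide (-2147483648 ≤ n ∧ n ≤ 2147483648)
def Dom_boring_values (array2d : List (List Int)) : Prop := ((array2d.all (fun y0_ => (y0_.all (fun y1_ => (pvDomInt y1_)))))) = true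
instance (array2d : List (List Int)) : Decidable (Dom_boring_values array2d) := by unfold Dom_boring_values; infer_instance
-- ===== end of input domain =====

-- B replaces A's single pass with three hardcoded 8-neighbour if-blocks by a separable
-- two-stage filter: first a per-row horizontal-constancy mask H, then a pass combining the
-- three mask rows around each cell with a vertical column check; same cost, different algorithm.

-- array2d[x][y] (in-range on every input Pre_ admits; default 0 outside, unreached under Pre_)
def pyCell (a : List (List Int)) (x y : Int) : Int :=
  PySem.List.pyGetD (PySem.List.pyGetD a x []) y 0

-- ===== PORT A =====
def boring_values (array2d : List (List Int)) : List (List (Option Int)) :=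
  let xsize : Int := array2d.length
  let ysize : Int := ((PySem.List.pyGetD array2d 0 []).length : Int)
  let result0 : List (List (Option Int)) :=
    (PySem.List.pyRange 0 xsize 1).foldl
      (fun r _ => r ++ [List.replicate ysize.toNat (none : Option Int)]) []
  (PySem.List.pyRange 1 (xsize - 1) 1).foldl
    (fun r x =>
      let ys : Int := ((PySem.List.pyGetD r x []).length : Int)
      let r1 := r.modify x.toNat (fun row => row.set (0 : Nat) none)
      let r2 := r1.modify x.toNat (fun row => row.set (ys - 1).toNat none)
      (PySem.List.pyRange 1 (ys - 1) 1).foldl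
        (fun r y =>
          let v := pyCell array2d x y
          let ra := r.modify x.toNat (fun row => row.set y.toNat (some v))
          let rb := if v ≠ pyCell array2d (x-1) y ∨ v ≠ pyCell array2d (x+1) y ∨ v ≠ pyCell array2d x (y-1)
                    then ra.modify x.toNat (fun row => row.set y.toNat none) else ra
          let rc := if v ≠ pyCell array2d (x-1) (y-1) ∨ v ≠ pyCell array2d (x+1) (y-1) ∨ v ≠ pyCell array2d x (y+1)
                    then rb.modify x.toNat (fun row => row.set y.toNat none) else rb
          if v ≠ pyCell array2d (x-1) (y+1) ∨ v ≠ pyCell array2d (x+1) (y+1)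
          then rc.modify x.toNat (fun row => row.set y.toNat none) else rc)
        r2)
    result0

-- ===== PORT B =====
-- H-mask entry for one row: 0 < y < len(row)-1 and row[y-1] == row[y] == row[y+1]
def bvHcell (row : List Int) (y : Int) : Bool :=
  decide (0 < y ∧ y < (row.length : Int) - 1) &&
  (PySem.List.pyGetD row (y-1) 0 == PySem.List.pyGetD row y 0 &&
   PySem.List.pyGetD row y 0 == PySem.List.pyGetD row (y+1) 0)

def boring_values_alt (array2d : List (List Int)) : List (List (Option Int)) :=
  let xsize : Int := array2d.length
  let ysize : Int := ((PySem.List.pyGetD array2d 0 []).length : Int)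
  -- Stage 1: per-row horizontal-constancy mask
  let H : List (List Bool) :=
    array2d.map (fun row => (PySem.List.pyRange 0 ysize 1).map (bvHcell row))
  -- Stage 2: combine three mask rows with a vertical column check
  (PySem.List.pyRange 0 xsize 1).map (fun x =>
    (PySem.List.pyRange 0 ysize 1).map (fun y =>
      if (0 < x ∧ x < xsize - 1) ∧ (0 < y ∧ y < ysize - 1) ∧
         PySem.List.pyGetD (PySem.List.pyGetD H (x-1) []) y false = true ∧
         PySem.List.pyGetD (PySem.List.pyGetD H x []) y false = true ∧
         PySem.List.pyGetD (PySem.List.pyGetD H (x+1) []) y false = true ∧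
         pyCell array2d (x-1) y = pyCell array2d x y ∧
         pyCell array2d x y = pyCell array2d (x+1) y
      then some (pyCell array2d x y) else none))

-- ===== PRECONDITION & SPEC =====
-- Pre_ excludes the empty grid and, when there are at least 3 rows, zero-width grids and grids
-- with a row shorter than row 0: there A raises IndexError mid-scan, or returns only by an
-- accident of `or` short-circuit evaluation order skipping the missing cell (see cites).
def Pre_boring_values (array2d : List (List Int)) : Prop :=
  array2d ≠ [] ∧
  (3 ≤ array2d.length →
    1 ≤ (array2d.headI).length ∧
    (3 ≤ (array2d.headI).length → ∀ row ∈ array2d, (array2d.headI).length ≤ row.length))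
instance (array2d : List (List Int)) : Decidable (Pre_boring_values array2d) := by
  unfold Pre_boring_values; infer_instance
def pvWitness_boring_values : List (List Int) := [[1, 1, 1], [1, 2, 1], [1, 1, 1]]

def Spec_boring_values (array2d : List (List Int)) (out : List (List (Option Int))) : Prop := out = boring_values_alt array2d
instance (array2d : List (List Int)) (out : List (List (Option Int))) : Decidable (Spec_boring_values array2d out) := by unfold Spec_boring_values; infer_instance

-- ===== CLAIM (what is proved, stated in full; the proofs are below) =====
def Claim_equal_boring_values : Prop := ∀ (array2d : List (List Int)), Dom_boring_values array2d → Pre_boring_values array2d → Spec_boring_values array2d (boring_values array2d)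

-- ===== LEMMAS AND PROOFS =====

-- the cell value A's three if-blocks leave at an interior position (x, y)
def bvCell (a : List (List Int)) (x y : Int) : Option Int :=
  if (pyCell a x y ≠ pyCell a (x-1) y ∨ pyCell a x y ≠ pyCell a (x+1) y ∨ pyCell a x y ≠ pyCell a x (y-1)) ∨
     (pyCell a x y ≠ pyCell a (x-1) (y-1) ∨ pyCell a x y ≠ pyCell a (x+1) (y-1) ∨ pyCell a x y ≠ pyCell a x (y+1)) ∨
     (pyCell a x y ≠ pyCell a (x-1) (y+1) ∨ pyCell a x y ≠ pyCell a (x+1) (y+1))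
  then none else some (pyCell a x y)

-- the transformation A's x-iteration applies to row x (row length m)
def bvTrow (a : List (List Int)) (m : Nat) (x : Int) (row : List (Option Int)) : List (Option Int) :=
  (PySem.List.pyRange 1 ((m : Int) - 1) 1).foldl
    (fun row y => row.set y.toNat (bvCell a x y))
    ((row.set (0 : Nat) none).set ((m : Int) - 1).toNat none)

-- A's outer-loop body as a named function (defeq to the lambda in the port)
def bvStepA (a : List (List Int)) (r : List (List (Option Int))) (x : Int) : List (List (Option Int)) :=
  let ys : Int := ((PySem.List.pyGetD r x []).length : Int)
  let r1 := r.modify x.toNat (fun row => row.set (0 : Nat) none)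
  let r2 := r1.modify x.toNat (fun row => row.set (ys - 1).toNat none)
  (PySem.List.pyRange 1 (ys - 1) 1).foldl
    (fun r y =>
      let v := pyCell a x y
      let ra := r.modify x.toNat (fun row => row.set y.toNat (some v))
      let rb := if v ≠ pyCell a (x-1) y ∨ v ≠ pyCell a (x+1) y ∨ v ≠ pyCell a x (y-1)
                then ra.modify x.toNat (fun row => row.set y.toNat none) else ra
      let rc := if v ≠ pyCell a (x-1) (y-1) ∨ v ≠ pyCell a (x+1) (y-1) ∨ v ≠ pyCell a x (y+1)
                then rb.modify x.toNat (fun row => row.set y.toNat none) else rb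
      if v ≠ pyCell a (x-1) (y+1) ∨ v ≠ pyCell a (x+1) (y+1)
      then rc.modify x.toNat (fun row => row.set y.toNat none) else rc)
    r2

theorem boring_values_eq (a : List (List Int)) :
    boring_values a =
      (PySem.List.pyRange 1 ((a.length : Int) - 1) 1).foldl (bvStepA a)
        ((PySem.List.pyRange 0 (a.length : Int) 1).foldl
          (fun r _ => r ++ [List.replicate ((PySem.List.pyGetD a 0 []).length : Int).toNat (none : Option Int)]) []) := rfl

theorem foldl_append_const {β : Type} (l : List Int) (init : List β) (c : β) :
    l.foldl (fun r _ => r ++ [c]) init = init ++ List.replicate l.length c := by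
  induction l generalizing init with
  | nil => simp
  | cons h t ih => simp [ih, List.replicate_succ]

theorem modify_id' {β : Type} (l : List β) (i : Nat) : l.modify i (fun x => x) = l := by
  apply List.ext_getElem?
  intro j
  simp [List.getElem?_modify]

theorem modify_modify_same {β : Type} (l : List β) (i : Nat) (f g : β → β) :
    (l.modify i f).modify i g = l.modify i (fun x => g (f x)) := by
  apply List.ext_getElem?
  intro j
  simp [List.getElem?_modify]
  cases l[j]? with
  | none => simp
  | some v => by_cases h : i = j <;> simp [h]

theorem foldl_modify_const_idx {β : Type} (l : List Int) (i : Nat) (g : Int → β → β)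
    (r : List β) :
    l.foldl (fun r y => r.modify i (g y)) r = r.modify i (fun row => l.foldl (fun row y => g y row) row) := by
  induction l generalizing r with
  | nil => simp [modify_id']
  | cons h t ih => simp [List.foldl_cons, ih, modify_modify_same]

theorem set_replicate_self' {β : Type} (m i : Nat) (c : β) :
    (List.replicate m c).set i c = List.replicate m c := by
  apply List.ext_getElem?
  intro j
  rw [List.getElem?_set]
  split_ifs with h1 h2
  · rw [List.getElem?_replicate, if_pos (by simp at h2; omega)]
  · rw [List.getElem?_replicate, if_neg (by simp at h2; omega)]
  · rfl

theorem bvStepA_eq (a : List (List Int)) (m : Nat) (r : List (List (Option Int))) (x : Int)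
    (hx0 : 0 ≤ x) (hx : x < (r.length : Int))
    (hrows : ∀ (j : Nat) row, r[j]? = some row → row.length = m) :
    bvStepA a r x = r.modify x.toNat (bvTrow a m x) := by
  have hxlt : x.toNat < r.length := by omega
  have hlen : PySem.List.pyGetD r x [] = r[x.toNat] :=
    PySem.List.pyGetD_eq_getElem r [] hx0 hx
  have hm : (PySem.List.pyGetD r x []).length = m := by
    rw [hlen]
    exact hrows x.toNat r[x.toNat] (List.getElem?_eq_getElem hxlt)
  unfold bvStepA
  rw [hm]
  have hstep : (fun (r : List (List (Option Int))) (y : Int) =>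
      let v := pyCell a x y
      let ra := r.modify x.toNat (fun row => row.set y.toNat (some v))
      let rb := if v ≠ pyCell a (x-1) y ∨ v ≠ pyCell a (x+1) y ∨ v ≠ pyCell a x (y-1)
                then ra.modify x.toNat (fun row => row.set y.toNat none) else ra
      let rc := if v ≠ pyCell a (x-1) (y-1) ∨ v ≠ pyCell a (x+1) (y-1) ∨ v ≠ pyCell a x (y+1)
                then rb.modify x.toNat (fun row => row.set y.toNat none) else rb
      if v ≠ pyCell a (x-1) (y+1) ∨ v ≠ pyCell a (x+1) (y+1)
      then rc.modify x.toNat (fun row => row.set y.toNat none) else rc)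
      = fun r y => r.modify x.toNat (fun row => row.set y.toNat (bvCell a x y)) := by
    funext r y
    by_cases h1 : pyCell a x y ≠ pyCell a (x-1) y ∨ pyCell a x y ≠ pyCell a (x+1) y ∨ pyCell a x y ≠ pyCell a x (y-1) <;>
      by_cases h2 : pyCell a x y ≠ pyCell a (x-1) (y-1) ∨ pyCell a x y ≠ pyCell a (x+1) (y-1) ∨ pyCell a x y ≠ pyCell a x (y+1) <;>
        by_cases h3 : pyCell a x y ≠ pyCell a (x-1) (y+1) ∨ pyCell a x y ≠ pyCell a (x+1) (y+1) <;>
          simp [bvCell, h1, h2, h3, modify_modify_same, List.set_set]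
  rw [hstep, foldl_modify_const_idx, modify_modify_same, modify_modify_same]
  rfl

theorem foldl_set_length {β : Type} (l : List Int) (f : Int → Nat) (g : Int → β) :
    ∀ row : List β, (l.foldl (fun row y => row.set (f y) (g y)) row).length = row.length := by
  induction l with
  | nil => intro row; simp
  | cons h t ih => intro row; simp [ih]

theorem bvTrow_length (a : List (List Int)) (m : Nat) (x : Int) (row : List (Option Int)) :
    (bvTrow a m x row).length = row.length := by
  unfold bvTrow
  rw [foldl_set_length (PySem.List.pyRange 1 ((m : Int) - 1) 1) (fun y => y.toNat) (fun y => bvCell a x y)]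
  simp

theorem inner_main (a : List (List Int)) (x : Int) (m : Nat) :
    ∀ (c : Nat) (lo : Int) (row : List (Option Int)), 0 ≤ lo → row.length = m →
      (((m : Int) - 1) - lo).toNat = c →
      ∀ j : Nat,
        ((PySem.List.pyRange lo ((m : Int) - 1) 1).foldl
            (fun row y => row.set y.toNat (bvCell a x y)) row)[j]? =
          if lo ≤ (j : Int) ∧ (j : Int) < (m : Int) - 1 then
            (if j < m then some (bvCell a x (j : Int)) else none)
          else row[j]? := by
  intro c
  induction c with
  | zero =>
    intro lo row hlo hrow hc j
    rw [PySem.List.pyRange_one_eq_nil (by omega)]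
    simp only [List.foldl_nil]
    rw [if_neg (by omega)]
  | succ c ih =>
    intro lo row hlo hrow hc j
    have hlt : lo < (m : Int) - 1 := by omega
    rw [PySem.List.pyRange_one_cons hlt]
    simp only [List.foldl_cons]
    rw [ih (lo + 1) _ (by omega) (by simp [hrow]) (by omega) j]
    by_cases hj : lo + 1 ≤ (j : Int) ∧ (j : Int) < (m : Int) - 1
    · rw [if_pos hj, if_pos (show lo ≤ (j : Int) ∧ (j : Int) < (m : Int) - 1 by omega)]
    · rw [if_neg hj, List.getElem?_set]
      by_cases hj2 : lo ≤ (j : Int) ∧ (j : Int) < (m : Int) - 1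
      · -- only j = lo is possible here
        have hjl : lo.toNat = j := by omega
        rw [if_pos hjl, hrow, if_pos (show lo.toNat < m by omega), if_pos hj2,
            if_pos (show j < m by omega)]
        have hlj : lo = (j : Int) := by omega
        rw [hlj]
      · rw [if_neg (show ¬ lo.toNat = j by omega), if_neg hj2]

theorem outer_main (a : List (List Int)) (m n : Nat) :
    ∀ (c : Nat) (lo : Int) (r : List (List (Option Int))), 1 ≤ lo → r.length = n →
      (((n : Int) - 1) - lo).toNat = c →
      (∀ (j : Nat) row, r[j]? = some row → row.length = m) →
      ∀ k : Nat,
        ((PySem.List.pyRange lo ((n : Int) - 1) 1).foldl (bvStepA a) r)[k]? =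
          if lo ≤ (k : Int) ∧ (k : Int) < (n : Int) - 1 then
            (r[k]?).map (bvTrow a m (k : Int))
          else r[k]? := by
  intro c
  induction c with
  | zero =>
    intro lo r hlo hn hc hrows k
    rw [PySem.List.pyRange_one_eq_nil (by omega)]
    simp only [List.foldl_nil]
    rw [if_neg (by omega)]
  | succ c ih =>
    intro lo r hlo hn hc hrows k
    have hlt : lo < (n : Int) - 1 := by omega
    rw [PySem.List.pyRange_one_cons hlt]
    simp only [List.foldl_cons]
    have hstep := bvStepA_eq a m r lo (by omega) (by rw [hn]; omega) hrows
    rw [hstep]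
    have hrows' : ∀ (j : Nat) row, (r.modify lo.toNat (bvTrow a m lo))[j]? = some row → row.length = m := by
      intro j row hj
      rw [List.getElem?_modify] at hj
      cases hr : r[j]? with
      | none => rw [hr] at hj; simp at hj
      | some row0 =>
        rw [hr] at hj
        by_cases he : lo.toNat = j
        · simp [he] at hj
          rw [← hj, bvTrow_length]
          exact hrows j row0 hr
        · simp [he] at hj
          rw [← hj]
          exact hrows j row0 hr
    rw [ih (lo + 1) _ (by omega) (by simp [hn]) (by omega) hrows' k]
    rw [List.getElem?_modify]
    by_cases hj : lo + 1 ≤ (k : Int) ∧ (k : Int) < (n : Int) - 1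
    · rw [if_pos hj, if_pos (by omega)]
      have : ¬ lo.toNat = k := by omega
      cases r[k]? <;> simp [this]
    · rw [if_neg hj]
      by_cases hj2 : lo ≤ (k : Int) ∧ (k : Int) < (n : Int) - 1
      · have hklo : (k : Int) = lo := by omega
        rw [if_pos hj2]
        cases r[k]? <;> simp [← hklo]
      · rw [if_neg hj2]
        cases r[k]? <;> simp [show ¬ lo.toNat = k by omega]

-- B's H lookup at an in-range (x', y) reduces to bvHcell of the actual row
theorem bvH_lookup (a : List (List Int)) (m : Int) (x' y : Int)
    (hx0 : 0 ≤ x') (hx : x' < (a.length : Int)) (hy0 : 0 ≤ y) (hy : y < m) :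
    PySem.List.pyGetD
      (PySem.List.pyGetD (a.map (fun row => (PySem.List.pyRange 0 m 1).map (bvHcell row))) x' []) y false
      = bvHcell (PySem.List.pyGetD a x' []) y := by
  rw [PySem.List.pyGetD_eq_getElem _ _ hx0 (by simpa using hx), List.getElem_map,
      PySem.List.pyGetD_map_pyRange_of_nonneg _ m y false hy0 hy,
      PySem.List.pyGetD_eq_getElem a [] hx0 hx]

-- under Pre_, at an interior cell B's condition matches A's bvCell
theorem cell_agree (a : List (List Int)) (m : Nat) (hm : m = (PySem.List.pyGetD a 0 []).length)
    (hrows : ∀ row ∈ a, m ≤ row.length) (x y : Int)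
    (hx1 : 1 ≤ x) (hx2 : x < (a.length : Int) - 1)
    (hy1 : 1 ≤ y) (hy2 : y < (m : Int) - 1) :
    (if (0 < x ∧ x < (a.length : Int) - 1) ∧ (0 < y ∧ y < (m : Int) - 1) ∧
        PySem.List.pyGetD (PySem.List.pyGetD (a.map (fun row => (PySem.List.pyRange 0 (m : Int) 1).map (bvHcell row))) (x-1) []) y false = true ∧
        PySem.List.pyGetD (PySem.List.pyGetD (a.map (fun row => (PySem.List.pyRange 0 (m : Int) 1).map (bvHcell row))) x []) y false = true ∧
        PySem.List.pyGetD (PySem.List.pyGetD (a.map (fun row => (PySem.List.pyRange 0 (m : Int) 1).map (bvHcell row))) (x+1) []) y false = true ∧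
        pyCell a (x-1) y = pyCell a x y ∧ pyCell a x y = pyCell a (x+1) y
     then some (pyCell a x y) else none) = bvCell a x y := by
  have hHc : ∀ x' : Int, 0 ≤ x' → x' < (a.length : Int) →
      (bvHcell (PySem.List.pyGetD a x' []) y = true ↔
        (pyCell a x' (y-1) = pyCell a x' y ∧ pyCell a x' y = pyCell a x' (y+1))) := by
    intro x' h0 hlt
    have hmem : PySem.List.pyGetD a x' [] ∈ a := by
      rw [PySem.List.pyGetD_eq_getElem a [] h0 hlt]
      exact List.getElem_mem _
    have hlen : (m : Int) ≤ ((PySem.List.pyGetD a x' []).length : Int) := by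
      exact_mod_cast hrows _ hmem
    unfold bvHcell pyCell
    simp only [Bool.and_eq_true, decide_eq_true_iff, beq_iff_eq]
    constructor
    · rintro ⟨-, h1, h2⟩; exact ⟨h1, h2⟩
    · rintro ⟨h1, h2⟩; exact ⟨⟨by omega, by omega⟩, h1, h2⟩
  have h1 := (hHc (x-1) (by omega) (by omega))
  have h2 := (hHc x (by omega) (by omega))
  have h3 := (hHc (x+1) (by omega) (by omega))
  rw [bvH_lookup a (m : Int) (x-1) y (by omega) (by omega) (by omega) (by omega),
      bvH_lookup a (m : Int) x y (by omega) (by omega) (by omega) (by omega),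
      bvH_lookup a (m : Int) (x+1) y (by omega) (by omega) (by omega) (by omega)]
  unfold bvCell
  by_cases hD :
      (pyCell a x y ≠ pyCell a (x-1) y ∨ pyCell a x y ≠ pyCell a (x+1) y ∨ pyCell a x y ≠ pyCell a x (y-1)) ∨
      (pyCell a x y ≠ pyCell a (x-1) (y-1) ∨ pyCell a x y ≠ pyCell a (x+1) (y-1) ∨ pyCell a x y ≠ pyCell a x (y+1)) ∨
      (pyCell a x y ≠ pyCell a (x-1) (y+1) ∨ pyCell a x y ≠ pyCell a (x+1) (y+1))
  · rw [if_pos hD, if_neg]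
    rintro ⟨-, -, hh1, hh2, hh3, hc1, hc2⟩
    rw [h1] at hh1; rw [h2] at hh2; rw [h3] at hh3
    obtain ⟨a1, a2⟩ := hh1; obtain ⟨b1, b2⟩ := hh2; obtain ⟨c1, c2⟩ := hh3
    -- all nine cells equal: contradict hD
    rcases hD with (h | h | h) <;> rcases h with (h | h) <;> try rcases h with (h | h) <;> omega
    all_goals omega
  · rw [if_neg hD, if_pos]
    push Not at hD
    obtain ⟨⟨d1, d2, d3⟩, ⟨d4, d5, d6⟩, d7, d8⟩ := hD
    refine ⟨⟨by omega, hx2⟩, ⟨by omega, hy2⟩, ?_, ?_, ?_, by omega, by omega⟩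
    · rw [h1]; constructor <;> omega
    · rw [h2]; constructor <;> omega
    · rw [h3]; constructor <;> omega

theorem ports_agree (a : List (List Int)) (hpre : Pre_boring_values a) :
    boring_values a = boring_values_alt a := by
  set n : Nat := a.length with hn
  set m : Nat := (PySem.List.pyGetD a 0 []).length with hm
  -- A's grid, row by row
  have hA0 : (PySem.List.pyRange 0 (n : Int) 1).foldl
      (fun r _ => r ++ [List.replicate ((m : Int)).toNat (none : Option Int)]) []
      = List.replicate n (List.replicate m none) := by
    rw [foldl_append_const]
    simp [PySem.List.length_pyRange_one]
  have hAgrid : ∀ k : Nat, (boring_values a)[k]? =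
      if 1 ≤ (k : Int) ∧ (k : Int) < (n : Int) - 1 then
        some (bvTrow a m (k : Int) (List.replicate m none))
      else (List.replicate n (List.replicate m (none : Option Int)))[k]? := by
    intro k
    rw [boring_values_eq]
    have : ((PySem.List.pyGetD a 0 []).length : Int) = ((m : Nat) : Int) := by rw [hm]
    rw [this]
    rw [hA0]
    rw [outer_main a m n (((n : Int) - 1) - 1).toNat 1 _ (by omega) (by simp) rfl
      (by intro j row hj
          rw [List.getElem?_replicate] at hj
          split at hj
          · simp at hj; rw [← hj]; simp
          · simp at hj) k]
    by_cases hk : 1 ≤ (k : Int) ∧ (k : Int) < (n : Int) - 1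
    · rw [if_pos hk, if_pos hk, List.getElem?_replicate, if_pos (by omega)]
      rfl
    · rw [if_neg hk, if_neg hk]
  -- row-length facts from Pre_
  have hrowsPre : (1 ≤ (n : Int) ∧ 3 ≤ (m : Int)) → (3 ≤ (n : Int)) → ∀ row ∈ a, m ≤ row.length := by
    rintro ⟨h1, h3⟩ hn3 row hrow
    obtain ⟨hne, hP⟩ := hpre
    have hhead : a.headI = PySem.List.pyGetD a 0 [] := by
      cases a with
      | nil => exact absurd rfl hne
      | cons h t => simp [PySem.List.pyGetD_zero_cons]
    have := (hP (by omega)).2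
    rw [hhead, ← hm] at this
    exact this (by omega) row hrow
  -- B's grid
  have hBgrid : boring_values_alt a =
      (PySem.List.pyRange 0 (n : Int) 1).map (fun x =>
        (PySem.List.pyRange 0 (m : Int) 1).map (fun y =>
          if (0 < x ∧ x < (n : Int) - 1) ∧ (0 < y ∧ y < (m : Int) - 1) ∧
             PySem.List.pyGetD (PySem.List.pyGetD (a.map (fun row => (PySem.List.pyRange 0 (m : Int) 1).map (bvHcell row))) (x-1) []) y false = true ∧
             PySem.List.pyGetD (PySem.List.pyGetD (a.map (fun row => (PySem.List.pyRange 0 (m : Int) 1).map (bvHcell row))) x []) y false = true ∧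
             PySem.List.pyGetD (PySem.List.pyGetD (a.map (fun row => (PySem.List.pyRange 0 (m : Int) 1).map (bvHcell row))) (x+1) []) y false = true ∧
             pyCell a (x-1) y = pyCell a x y ∧ pyCell a x y = pyCell a (x+1) y
          then some (pyCell a x y) else none)) := rfl
  apply List.ext_getElem?
  intro k
  rw [hAgrid k, hBgrid, List.getElem?_map]
  by_cases hkn : k < n
  · rw [PySem.List.getElem?_pyRange_one, if_pos (show k < ((n : Int) - 0).toNat by omega)]
    simp only [Option.map_some, zero_add]
    have hrowB : ∀ j : Nat,
        ((PySem.List.pyRange 0 (m : Int) 1).map (fun y =>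
          if (0 < ((k : Nat) : Int) ∧ ((k : Nat) : Int) < (n : Int) - 1) ∧ (0 < y ∧ y < (m : Int) - 1) ∧
             PySem.List.pyGetD (PySem.List.pyGetD (a.map (fun row => (PySem.List.pyRange 0 (m : Int) 1).map (bvHcell row))) (((k : Nat) : Int)-1) []) y false = true ∧
             PySem.List.pyGetD (PySem.List.pyGetD (a.map (fun row => (PySem.List.pyRange 0 (m : Int) 1).map (bvHcell row))) ((k : Nat) : Int) []) y false = true ∧
             PySem.List.pyGetD (PySem.List.pyGetD (a.map (fun row => (PySem.List.pyRange 0 (m : Int) 1).map (bvHcell row))) (((k : Nat) : Int)+1) []) y false = true ∧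
             pyCell a (((k : Nat) : Int)-1) y = pyCell a ((k : Nat) : Int) y ∧ pyCell a ((k : Nat) : Int) y = pyCell a (((k : Nat) : Int)+1) y
          then some (pyCell a ((k : Nat) : Int) y) else none))[j]? =
        if j < m then
          some (if (0 < ((k : Nat) : Int) ∧ ((k : Nat) : Int) < (n : Int) - 1) ∧ (0 < (j : Int) ∧ (j : Int) < (m : Int) - 1) ∧
             PySem.List.pyGetD (PySem.List.pyGetD (a.map (fun row => (PySem.List.pyRange 0 (m : Int) 1).map (bvHcell row))) (((k : Nat) : Int)-1) []) (j : Int) false = true ∧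
             PySem.List.pyGetD (PySem.List.pyGetD (a.map (fun row => (PySem.List.pyRange 0 (m : Int) 1).map (bvHcell row))) ((k : Nat) : Int) []) (j : Int) false = true ∧
             PySem.List.pyGetD (PySem.List.pyGetD (a.map (fun row => (PySem.List.pyRange 0 (m : Int) 1).map (bvHcell row))) (((k : Nat) : Int)+1) []) (j : Int) false = true ∧
             pyCell a (((k : Nat) : Int)-1) (j : Int) = pyCell a ((k : Nat) : Int) (j : Int) ∧ pyCell a ((k : Nat) : Int) (j : Int) = pyCell a (((k : Nat) : Int)+1) (j : Int)
          then some (pyCell a ((k : Nat) : Int) (j : Int)) else none)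
        else none := by
      intro j
      rw [List.getElem?_map]
      by_cases hjm : j < m
      · rw [PySem.List.getElem?_pyRange_one, if_pos (show j < ((m : Int) - 0).toNat by omega),
            if_pos hjm]
        simp only [Option.map_some, zero_add]
      · rw [List.getElem?_eq_none (by simp [PySem.List.length_pyRange_one]; omega), if_neg hjm]
        simp
    by_cases hk : 1 ≤ (k : Int) ∧ (k : Int) < (n : Int) - 1
    · rw [if_pos hk]
      congr 1
      apply List.ext_getElem?
      intro j
      rw [hrowB j]
      by_cases hjm : j < m
      · rw [if_pos hjm]
        unfold bvTrow
        rw [set_replicate_self', set_replicate_self']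
        rw [inner_main a (k : Int) m (((m : Int) - 1) - 1).toNat 1 _ (by omega) (by simp) rfl j]
        by_cases hj : 1 ≤ (j : Int) ∧ (j : Int) < (m : Int) - 1
        · rw [if_pos hj, if_pos hjm]
          have hr : ∀ row ∈ a, m ≤ row.length :=
            hrowsPre ⟨by omega, by omega⟩ (by omega)
          rw [cell_agree a m hm hr (k : Int) (j : Int) (by omega) (by omega) (by omega) (by omega)]
        · rw [if_neg hj, List.getElem?_replicate, if_pos hjm,
              if_neg (by rintro ⟨⟨h1, h2⟩, ⟨h3, h4⟩, -⟩; omega)]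
      · rw [if_neg hjm, List.getElem?_eq_none (by rw [bvTrow_length]; simp; omega)]
    · rw [if_neg hk, List.getElem?_replicate, if_pos hkn]
      congr 1
      apply List.ext_getElem?
      intro j
      rw [hrowB j, List.getElem?_replicate]
      by_cases hjm : j < m
      · rw [if_pos hjm, if_pos hjm, if_neg (by rintro ⟨⟨h1, h2⟩, -⟩; omega)]
      · rw [if_neg hjm, if_neg hjm]
  · rw [if_neg (show ¬ (1 ≤ (k : Int) ∧ (k : Int) < (n : Int) - 1) by omega),
        List.getElem?_replicate, if_neg hkn,
        List.getElem?_eq_none (by simp [PySem.List.length_pyRange_one]; omega)]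
    simp

-- ===== VERDICT (by name: the statement is the Claim_ definition above) =====
theorem boring_values_spec : Claim_equal_boring_values := by
  intro a _ hpre
  unfold Spec_boring_values
  exact ports_agree a hpre
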